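-- pv_equiv track=rewrite | github.com/2001pgt/python-study | 심화2/4_2108.py | choi_bin_gap
-- ===== SOURCE A (Python) =====
-- def choi_bin_gap(A):
--     # 입력받은 수의 개수가 1면 첫번째 인덱스 숫자 리턴
--     if len(A) < 2:
--         return A[0]
--     # 숫자를 담을 리스트
--     num_bucket =[]
--     # 빈도수를 담을 리스트
--     size_bucket = []
--     # 빈도수
--     cnt = 1
--     for i in range(len(A)):
--         # 첫 인덱스의 숫자는 num_bucket에 저장
--         if i == 0:
--             num_bucket.append(A[0])
--         # 그 외는
--         else:
--             # 전 숫자와 현재 숫자가 같다면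
--             if A[i] == A[i - 1]:
--                 # 빈도수 +1
--                 cnt += 1
--                 # 마지막 숫자면
--                 if i == len(A)-1:
--                     # 사이즈 버킷에 현재 빈도수 추가
--                     size_bucket.append(cnt)
--             # 같지 않다면
--             else:
--                 # size_bucket에 빈도수cnt추가후
--                 size_bucket.append(cnt)
--                 # 빈도수 1 로 초기화
--                 cnt = 1
--                 # num_bucket에는 현재 숫자 추가
--                 num_bucket.append(A[i])
--     # 루프가 끝난후 빈도수 리스트에서 가장 큰 수 추출
--     max_size = max(size_bucket)
--
--     # 가장 큰수의 인덱스를 리스트로 나열(1개든 여러개든 상관없음)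
--     max_indices = [i for i, value in enumerate(size_bucket) if value == max_size]
--
--     # 빈도수 리스트에서 가장 큰 수의 인덱스 = 전체 숫자중 최빈값의 인덱스
--
--     # 만약 여러개면
--     if len(max_indices) > 1:
--         # 2번 째 값이 최빈값중 두번째로작은 인덱스 이므로
--         # 해당 값을 num_bucket의 인덱스값으로 하여 리턴
--         return num_bucket[max_indices[1]]
--     else:
--         # 한개면 해당 수로 인덱스 하여 출력
--         return num_bucket[max_indices[0]]
-- ===== SOURCE B (Python) =====
-- def choi_bin_gap(A):
--     if len(A) < 2:
--         return A[0]
--     best = 0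
--     mode1 = None
--     mode2 = None
--     cnt = 0
--     for k, x in enumerate(A):
--         cnt += 1
--         if k + 1 == len(A) or A[k + 1] != x:
--             # a run of x (length cnt) ends at k
--             if cnt > best:
--                 best, mode1, mode2 = cnt, x, None
--             elif cnt == best and mode2 is None:
--                 mode2 = x
--             cnt = 0
--     return mode1 if mode2 is None else mode2
-- ===== Notes on version B (the rewrite author's own statement) =====
-- stated objective: simpler
-- what changed: Replaces A's materialized num/size bucket lists and the staged max()/index-filter/index-lookup selection by a single streaming pass that keeps only four scalars (best run length, first mode, second mode, current count) and no intermediate lists.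
-- intended difference: On two-element lists with distinct elements A never records the final run's count, so it returns the first element; B counts every run, sees a tie of two modes and returns the second-smallest mode (the second element), which is the intended tie-break of the task. — e.g. on choi_bin_gap([1, 2]): A returns 1, B returns 2
import Mathlib
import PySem

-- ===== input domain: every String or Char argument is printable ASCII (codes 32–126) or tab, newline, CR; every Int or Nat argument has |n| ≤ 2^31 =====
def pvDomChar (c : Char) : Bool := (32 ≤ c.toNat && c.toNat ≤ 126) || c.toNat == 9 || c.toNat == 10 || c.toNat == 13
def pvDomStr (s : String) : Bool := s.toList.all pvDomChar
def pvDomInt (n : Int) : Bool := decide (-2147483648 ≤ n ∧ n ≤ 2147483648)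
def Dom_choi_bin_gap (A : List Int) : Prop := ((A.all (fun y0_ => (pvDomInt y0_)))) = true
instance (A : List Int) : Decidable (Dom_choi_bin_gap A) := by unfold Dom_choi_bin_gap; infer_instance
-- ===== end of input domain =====

-- B replaces A's materialized num/size bucket lists plus the staged max()/index-filter
-- selection by a single streaming pass keeping only four scalars (best run length, first
-- and second mode, current count); on two-element lists of distinct values A misses the
-- last run and returns the first element, B returns the intended second mode (see D_).

-- ===== PORT A =====
-- the for-loop over i in range(len(A)); state = (num_bucket, size_bucket, cnt), prev = A[i-1]
def loopA : Int → List Int → List Int → List Int → Int → List Int × List Int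
  | _, [], num, size, _ => (num, size)
  | prev, x :: xs, num, size, cnt =>
    if x = prev then
      if xs = [] then loopA x xs num (size ++ [cnt + 1]) (cnt + 1)
      else loopA x xs num size (cnt + 1)
    else loopA x xs (num ++ [x]) (size ++ [cnt]) 1

def choi_bin_gap (A : List Int) : Int :=
  if A.length < 2 then (PySem.List.pyGet? A 0).getD 0
  else
    match A with
    | [] => 0  -- unreachable: length ≥ 2
    | a :: rest =>
      let p := loopA a rest [a] [] 1
      let num := p.1
      let size := p.2
      let maxSize := (PySem.List.max? size (fun x => x)).getD 0
      let maxIndices := ((PySem.List.enumerate size 0).filter (fun q => q.2 = maxSize)).map (fun q => q.1)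
      if maxIndices.length > 1 then
        (PySem.List.pyGet? num ((PySem.List.pyGet? maxIndices 1).getD 0)).getD 0
      else
        (PySem.List.pyGet? num ((PySem.List.pyGet? maxIndices 0).getD 0)).getD 0

-- ===== PORT B =====
-- Source B's for-loop over enumerate(A); the lookahead 'A[k+1] != x' is the head of the
-- remaining list; state = (best, mode1, mode2, cnt), processed element x, rest of A
def loopB : Int → Option Int → Option Int → Int → Int → List Int → Int × Option Int × Option Int
  | best, m1, m2, cnt, x, rest =>
    let cnt := cnt + 1
    match rest with
    | [] =>
      if cnt > best then (cnt, some x, none)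
      else if cnt = best ∧ m2 = none then (best, m1, some x)
      else (best, m1, m2)
    | y :: ys =>
      if y ≠ x then
        if cnt > best then loopB cnt (some x) none 0 y ys
        else if cnt = best ∧ m2 = none then loopB best m1 (some x) 0 y ys
        else loopB best m1 m2 0 y ys
      else loopB best m1 m2 cnt y ys

def choi_bin_gap_alt (A : List Int) : Int :=
  if A.length < 2 then (PySem.List.pyGet? A 0).getD 0
  else
    match A with
    | [] => 0  -- unreachable: length ≥ 2
    | x :: rest =>
      let st := loopB 0 none none 0 x rest
      match st.2.2 with
      | none => st.2.1.getD 0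
      | some v => v

-- ===== PRECONDITION & SPEC =====
-- Pre_ excludes only the empty list, on which A (and B) raise IndexError reading the first element.
def Pre_choi_bin_gap (A : List Int) : Prop := A ≠ []
instance (A : List Int) : Decidable (Pre_choi_bin_gap A) := by unfold Pre_choi_bin_gap; infer_instance
def pvWitness_choi_bin_gap : List Int := [1, 1, 2]

-- On two-element lists with distinct elements A never records the final run's count, so it
-- returns the first element; B counts every run, sees a tie of two modes and returns the
-- intended second-smallest mode, the second element.
def D_choi_bin_gap (A : List Int) : Prop :=
  A.length = 2 ∧ PySem.List.pyGet? A 0 ≠ PySem.List.pyGet? A 1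
instance (A : List Int) : Decidable (D_choi_bin_gap A) := by unfold D_choi_bin_gap; infer_instance

def Spec_choi_bin_gap (A : List Int) (out : Int) : Prop :=
  ¬ D_choi_bin_gap A → out = choi_bin_gap_alt A
instance (A : List Int) (out : Int) : Decidable (Spec_choi_bin_gap A out) := by unfold Spec_choi_bin_gap; infer_instance

def pvDiffWitness_choi_bin_gap : List Int := [1, 2]
def pvDiffWitnessOut_choi_bin_gap : Int × Int := (1, 2)

-- ===== CLAIM (what is proved, stated in full; the proofs are below) =====
def Claim_unchanged_choi_bin_gap : Prop := ∀ (A : List Int), Dom_choi_bin_gap A → Pre_choi_bin_gap A → Spec_choi_bin_gap A (choi_bin_gap A)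
def Claim_changed_choi_bin_gap : Prop := Dom_choi_bin_gap (pvDiffWitness_choi_bin_gap) ∧ Pre_choi_bin_gap (pvDiffWitness_choi_bin_gap) ∧ D_choi_bin_gap (pvDiffWitness_choi_bin_gap) ∧ choi_bin_gap (pvDiffWitness_choi_bin_gap) = pvDiffWitnessOut_choi_bin_gap.1 ∧ choi_bin_gap_alt (pvDiffWitness_choi_bin_gap) = pvDiffWitnessOut_choi_bin_gap.2 ∧ pvDiffWitnessOut_choi_bin_gap.1 ≠ pvDiffWitnessOut_choi_bin_gap.2
def Claim_exact_choi_bin_gap : Prop := ∀ (A : List Int), Dom_choi_bin_gap A → Pre_choi_bin_gap A → D_choi_bin_gap A → choi_bin_gap A ≠ choi_bin_gap_alt A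

-- ===== LEMMAS AND PROOFS =====

-- run-length view used to characterise BOTH ports (proof-only)
def countRun : Int → List Int → Int × List Int
  | _, [] => (0, [])
  | v, x :: xs => if x = v then ((countRun v xs).1 + 1, (countRun v xs).2) else (0, x :: xs)

def runListF : Nat → List Int → List (Int × Int)
  | 0, _ => []
  | _, [] => []
  | fuel + 1, x :: xs => (x, (countRun x xs).1 + 1) :: runListF fuel (countRun x xs).2

def runList (l : List Int) : List (Int × Int) := runListF l.length l

theorem countRun_length_le (v : Int) (l : List Int) : (countRun v l).2.length ≤ l.length := by
  induction l with
  | nil => simp [countRun]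
  | cons x xs ih => by_cases h : x = v <;> simp [countRun, h] <;> try omega

theorem runListF_eq : ∀ (f1 f2 : Nat) (l : List Int), l.length ≤ f1 → l.length ≤ f2 →
    runListF f1 l = runListF f2 l := by
  intro f1
  induction f1 with
  | zero =>
    intro f2 l h1 _
    have : l = [] := by cases l <;> simp_all
    subst this; cases f2 <;> simp [runListF]
  | succ f ih =>
    intro f2 l h1 h2
    cases l with
    | nil => cases f2 <;> simp [runListF]
    | cons x xs =>
      cases f2 with
      | zero => simp at h2
      | succ f2' =>
        simp only [runListF]
        have hr := countRun_length_le x xs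
        simp at h1 h2
        rw [ih f2' _ (by omega) (by omega)]

theorem runList_nil : runList [] = [] := rfl

theorem runList_cons (x : Int) (xs : List Int) :
    runList (x :: xs) = (x, (countRun x xs).1 + 1) :: runList (countRun x xs).2 := by
  unfold runList
  simp only [List.length_cons, runListF]
  have hr := countRun_length_le x xs
  exact congrArg _ (runListF_eq xs.length _ _ (by omega) (by omega))

theorem countRun_nonneg (v : Int) (l : List Int) : 0 ≤ (countRun v l).1 := by
  induction l with
  | nil => simp [countRun]
  | cons x xs ih => by_cases h : x = v <;> simp [countRun, h] <;> try omega

theorem countRun_zero_nil (v : Int) (l : List Int)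
    (h1 : (countRun v l).1 = 0) (h2 : (countRun v l).2 = []) : l = [] := by
  cases l with
  | nil => rfl
  | cons x xs =>
    by_cases h : x = v
    · exfalso; have := countRun_nonneg v xs; simp [countRun, h] at h1; omega
    · simp [countRun, h] at h2

theorem runList_eq_nil_iff (l : List Int) : runList l = [] ↔ l = [] := by
  cases l with
  | nil => simp [runList_nil]
  | cons x xs => rw [runList_cons]; simp

theorem runList_pos : ∀ (l : List Int), ∀ p ∈ runList l, 1 ≤ p.2 := by
  intro l
  induction hn : l.length using Nat.strong_induction_on generalizing l with
  | _ n ih =>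
    cases l with
    | nil => simp [runList_nil]
    | cons x xs =>
      intro p hp
      rw [runList_cons] at hp
      rcases List.mem_cons.mp hp with h | h
      · subst h; have := countRun_nonneg x xs; simp; omega
      · have hr := countRun_length_le x xs
        exact ih (countRun x xs).2.length (by simp at hn; omega) _ rfl p h

-- size-bucket shape: pack c0 rs = contributions of the remaining runs given current count c0
def pack (c0 : Int) : List (Int × Int) → List Int
  | [] => [c0]
  | (_, k) :: rs => if k = 1 ∧ rs = [] then [c0] else c0 :: pack k rs

theorem loopA_spec : ∀ (rest : List Int) (prev : Int) (num size : List Int) (cnt : Int),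
    rest ≠ [] →
    loopA prev rest num size cnt =
      (num ++ (runList (countRun prev rest).2).map Prod.fst,
       size ++ pack (cnt + (countRun prev rest).1) (runList (countRun prev rest).2)) := by
  intro rest
  induction rest with
  | nil => intro _ _ _ _ h; exact absurd rfl h
  | cons x xs ih =>
    intro prev num size cnt _
    by_cases hx : x = prev
    · subst hx
      by_cases hxs : xs = []
      · subst hxs
        simp [loopA, countRun, runList_nil, pack]
      · have hstep : loopA x (x :: xs) num size cnt = loopA x xs num size (cnt + 1) := by
          simp [loopA, hxs]
        rw [hstep, ih x num size (cnt + 1) hxs]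
        have hc : countRun x (x :: xs) = ((countRun x xs).1 + 1, (countRun x xs).2) := by
          simp [countRun]
        rw [hc]
        have : cnt + ((countRun x xs).1 + 1) = cnt + 1 + (countRun x xs).1 := by ring
        rw [this]
    · have hc : countRun prev (x :: xs) = (0, x :: xs) := by simp [countRun, hx]
      have hstep : loopA prev (x :: xs) num size cnt
          = loopA x xs (num ++ [x]) (size ++ [cnt]) 1 := by
        simp [loopA, hx]
      rw [hstep, hc, runList_cons]
      by_cases hxs : xs = []
      · subst hxs
        simp [loopA, countRun, runList_nil, pack]
      · rw [ih x (num ++ [x]) (size ++ [cnt]) 1 hxs]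
        have hguard : ¬ ((countRun x xs).1 + 1 = 1 ∧ runList (countRun x xs).2 = []) := by
          rintro ⟨h1, h2⟩
          rw [runList_eq_nil_iff] at h2
          exact hxs (countRun_zero_nil x xs (by omega) h2)
        have hpack : pack (cnt + 0) ((x, (countRun x xs).1 + 1) :: runList (countRun x xs).2)
            = cnt :: pack ((countRun x xs).1 + 1) (runList (countRun x xs).2) := by
          rw [pack]
          simp only [if_neg hguard]
          norm_num
        rw [hpack]
        have h1 : (1 : Int) + (countRun x xs).1 = (countRun x xs).1 + 1 := by ring
        rw [h1]
        simp

theorem pack_of_last_ne_one : ∀ (rs : List (Int × Int)) (c0 : Int),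
    (∀ p, rs.getLast? = some p → p.2 ≠ 1) →
    pack c0 rs = c0 :: rs.map Prod.snd := by
  intro rs
  induction rs with
  | nil => intro c0 _; simp [pack]
  | cons p rs ih =>
    intro c0 h
    obtain ⟨v, k⟩ := p
    cases rs with
    | nil =>
      have hk : k ≠ 1 := h (v, k) (by simp)
      simp [pack, hk]
    | cons q rs' =>
      have h' : ∀ p, (q :: rs').getLast? = some p → p.2 ≠ 1 := by
        intro p hp; exact h p (by simpa [List.getLast?_cons_cons] using hp)
      have hg : pack c0 ((v, k) :: q :: rs') = c0 :: pack k (q :: rs') := by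
        rw [pack]; simp
      rw [hg, ih k h']; simp

theorem pack_of_last_one : ∀ (rs : List (Int × Int)) (c0 : Int) (p : Int × Int),
    rs.getLast? = some p → p.2 = 1 →
    pack c0 rs = c0 :: (rs.dropLast.map Prod.snd) := by
  intro rs
  induction rs with
  | nil => intro c0 p hp _; simp at hp
  | cons q rs ih =>
    intro c0 p hp h1
    obtain ⟨v, k⟩ := q
    cases rs with
    | nil =>
      simp at hp
      subst hp
      simp at h1
      simp [pack, h1]
    | cons q' rs' =>
      rw [List.getLast?_cons_cons] at hp
      have hg : pack c0 ((v, k) :: q' :: rs') = c0 :: pack k (q' :: rs') := by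
        rw [pack]; simp
      rw [hg, ih k p hp h1]; simp

theorem max?_id_value (l : List Int) (v : Int) (hv : v ∈ l) (hmax : ∀ y ∈ l, y ≤ v) :
    (PySem.List.max? l (fun x => x)).getD 0 = v := by
  cases h : PySem.List.max? l (fun x => x) with
  | none =>
    rw [PySem.List.max?_eq_none_iff] at h
    subst h; simp at hv
  | some w =>
    have hw : w ∈ l := PySem.List.max?_mem h
    have h1 : v ≤ w := PySem.List.max?_isMax h v hv
    have h2 : w ≤ v := hmax w hw
    simp; omega

theorem sel : ∀ (rs : List (Int × Int)) (pre suf : List Int) (m : Int),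
    ((PySem.List.enumerate (rs.map Prod.snd) (pre.length : Int)).filter (fun q => q.2 = m)).map
        (fun q => (PySem.List.pyGet? (pre ++ rs.map Prod.fst ++ suf) q.1).getD 0)
      = (rs.filter (fun p => p.2 = m)).map Prod.fst := by
  intro rs
  induction rs with
  | nil => intro pre suf m; simp [PySem.List.enumerate_nil]
  | cons p rs ih =>
    intro pre suf m
    obtain ⟨v, k⟩ := p
    have hih := ih (pre ++ [v]) suf m
    have hlen : (((pre ++ [v]).length : Nat) : Int) = (pre.length : Int) + 1 := by
      simp
    have hle : (pre ++ [v]) ++ rs.map Prod.fst ++ suf = pre ++ v :: (rs.map Prod.fst ++ suf) := by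
      simp
    rw [hlen, hle] at hih
    have hassoc : pre ++ ((v, k) :: rs).map Prod.fst ++ suf = pre ++ v :: (rs.map Prod.fst ++ suf) := by
      simp
    rw [hassoc]
    have hget : PySem.List.pyGet? (pre ++ v :: (rs.map Prod.fst ++ suf)) (pre.length : Int) = some v :=
      PySem.List.pyGet?_append_length pre (rs.map Prod.fst ++ suf) v
    simp only [List.map_cons, PySem.List.enumerate_cons, List.filter_cons]
    by_cases hk : k = m
    · simp [hk, hget, hih]
    · simp [hk, hih]

-- proof-only readings of the two ports' final selection step
def pickA (num size : List Int) : Int :=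
  if ((( PySem.List.enumerate size).filter (fun q => q.2 = (PySem.List.max? size (fun x => x)).getD 0)).map (fun q => q.1)).length > 1 then
    (PySem.List.pyGet? num ((PySem.List.pyGet? (((PySem.List.enumerate size).filter (fun q => q.2 = (PySem.List.max? size (fun x => x)).getD 0)).map (fun q => q.1)) 1).getD 0)).getD 0
  else
    (PySem.List.pyGet? num ((PySem.List.pyGet? (((PySem.List.enumerate size).filter (fun q => q.2 = (PySem.List.max? size (fun x => x)).getD 0)).map (fun q => q.1)) 0).getD 0)).getD 0

def pickB (rs : List (Int × Int)) : Int :=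
  if ((rs.filter (fun p => p.2 = (PySem.List.max? (rs.map (fun p => p.2)) (fun x => x)).getD 0)).map (fun p => p.1)).length > 1 then
    (PySem.List.pyGet? ((rs.filter (fun p => p.2 = (PySem.List.max? (rs.map (fun p => p.2)) (fun x => x)).getD 0)).map (fun p => p.1)) 1).getD 0
  else
    (PySem.List.pyGet? ((rs.filter (fun p => p.2 = (PySem.List.max? (rs.map (fun p => p.2)) (fun x => x)).getD 0)).map (fun p => p.1)) 0).getD 0

theorem portA_cons (a b : Int) (t : List Int) :
    choi_bin_gap (a :: b :: t) = pickA (loopA a (b :: t) [a] [] 1).1 (loopA a (b :: t) [a] [] 1).2 := by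
  simp only [choi_bin_gap, pickA]
  rw [if_neg (by simp)]

-- ==== B-side characterisation: the streaming fold computes the filter-based selection ====
def stepB (st : Int × Option Int × Option Int) (r : Int × Int) : Int × Option Int × Option Int :=
  if r.2 > st.1 then (r.2, some r.1, none)
  else if r.2 = st.1 ∧ st.2.2 = none then (st.1, st.2.1, some r.1)
  else st

def Mx (rs : List (Int × Int)) : Int := (PySem.List.max? (rs.map (fun p => p.2)) (fun x => x)).getD 0
def Fx (rs : List (Int × Int)) : List Int := (rs.filter (fun p => p.2 = Mx rs)).map (fun p => p.1)
def selS (rs : List (Int × Int)) : Int × Option Int × Option Int := (Mx rs, (Fx rs).head?, (Fx rs)[1]?)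

theorem max?_getD_mem (l : List Int) (hl : l ≠ []) :
    (PySem.List.max? l (fun x => x)).getD 0 ∈ l := by
  cases h : PySem.List.max? l (fun x => x) with
  | none => rw [PySem.List.max?_eq_none_iff] at h; exact absurd h hl
  | some w => simpa using PySem.List.max?_mem h

theorem max?_getD_bound (l : List Int) : ∀ y ∈ l, y ≤ (PySem.List.max? l (fun x => x)).getD 0 := by
  intro y hy
  cases h : PySem.List.max? l (fun x => x) with
  | none => rw [PySem.List.max?_eq_none_iff] at h; subst h; simp at hy
  | some w => simpa using PySem.List.max?_isMax h y hy

theorem Mx_nil : Mx [] = 0 := rfl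

theorem Fx_ne_nil (rs : List (Int × Int)) (hrs : rs ≠ []) : Fx rs ≠ [] := by
  have hm : Mx rs ∈ rs.map (fun p => p.2) := max?_getD_mem _ (by simpa using hrs)
  obtain ⟨p, hp, hpm⟩ := List.mem_map.mp hm
  have h1 : p ∈ rs.filter (fun p => p.2 = Mx rs) := List.mem_filter.mpr ⟨hp, by simp [hpm]⟩
  exact List.ne_nil_of_mem (List.mem_map_of_mem h1)

theorem step_sel (p : List (Int × Int)) (v c : Int)
    (hp : ∀ q ∈ p, 1 ≤ q.2) (hc : 1 ≤ c) :
    stepB (selS p) (v, c) = selS (p ++ [(v, c)]) := by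
  have hbound : ∀ y ∈ p.map (fun q => q.2), y ≤ Mx p := max?_getD_bound _
  by_cases hgt : Mx p < c
  · have hMnew : Mx (p ++ [(v, c)]) = c := by
      have hdef : Mx (p ++ [(v, c)])
          = (PySem.List.max? ((p ++ [(v, c)]).map (fun q => q.2)) (fun x => x)).getD 0 := rfl
      rw [hdef]
      apply max?_id_value
      · simp
      · intro y hy
        rw [List.map_append, List.mem_append] at hy
        rcases hy with h | h
        · have := hbound y h; omega
        · simp at h; omega
    have hFnew : Fx (p ++ [(v, c)]) = [v] := by
      unfold Fx
      rw [hMnew, List.filter_append]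
      have h1 : p.filter (fun q => q.2 = c) = [] := by
        rw [List.filter_eq_nil_iff]
        intro q hq
        have := hbound q.2 (List.mem_map_of_mem hq)
        simp; omega
      simp [h1]
    simp only [selS, stepB, hMnew, hFnew]
    simp [hgt]
  · by_cases heq : c = Mx p
    · have hpne : p ≠ [] := by
        intro h; subst h; rw [Mx_nil] at heq; omega
      have hMnew : Mx (p ++ [(v, c)]) = Mx p := by
        have hdef : Mx (p ++ [(v, c)])
            = (PySem.List.max? ((p ++ [(v, c)]).map (fun q => q.2)) (fun x => x)).getD 0 := rfl
        rw [hdef]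
        apply max?_id_value
        · rw [List.map_append, List.mem_append]
          left
          exact max?_getD_mem _ (by simpa using hpne)
        · intro y hy
          rw [List.map_append, List.mem_append] at hy
          rcases hy with h | h
          · exact hbound y h
          · simp at h; omega
      have hFnew : Fx (p ++ [(v, c)]) = Fx p ++ [v] := by
        unfold Fx
        rw [hMnew, List.filter_append]
        have h1 : [(v, c)].filter (fun q => q.2 = Mx p) = [(v, c)] := by
          simp [heq]
        rw [h1]; simp
      have hFne := Fx_ne_nil p hpne
      rcases hF : Fx p with _ | ⟨w0, ws⟩
      · exact absurd hF hFne
      rcases ws with _ | ⟨w1, ws'⟩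
      · simp only [selS, stepB, hMnew, hFnew, hF]
        simp [heq, hgt]
      · simp only [selS, stepB, hMnew, hFnew, hF]
        simp [heq, hgt]
    · have hlt : c < Mx p := by omega
      have hpne : p ≠ [] := by
        intro h; subst h; rw [Mx_nil] at hlt; omega
      have hMnew : Mx (p ++ [(v, c)]) = Mx p := by
        have hdef : Mx (p ++ [(v, c)])
            = (PySem.List.max? ((p ++ [(v, c)]).map (fun q => q.2)) (fun x => x)).getD 0 := rfl
        rw [hdef]
        apply max?_id_value
        · rw [List.map_append, List.mem_append]
          left
          exact max?_getD_mem _ (by simpa using hpne)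
        · intro y hy
          rw [List.map_append, List.mem_append] at hy
          rcases hy with h | h
          · exact hbound y h
          · simp at h; omega
      have hFnew : Fx (p ++ [(v, c)]) = Fx p := by
        unfold Fx
        rw [hMnew, List.filter_append]
        have h1 : [(v, c)].filter (fun q => q.2 = Mx p) = [] := by
          simp; omega
        rw [h1]; simp
      simp only [selS, stepB, hMnew, hFnew]
      have h2 : ¬ c > Mx p := by omega
      simp [heq, h2]

theorem foldl_stepB_sel : ∀ (rs p : List (Int × Int)),
    (∀ q ∈ p, 1 ≤ q.2) → (∀ q ∈ rs, 1 ≤ q.2) →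
    List.foldl stepB (selS p) rs = selS (p ++ rs) := by
  intro rs
  induction rs with
  | nil => intro p _ _; simp
  | cons r rs' ih =>
    intro p hp hrs
    obtain ⟨v, c⟩ := r
    have h1 : stepB (selS p) (v, c) = selS (p ++ [(v, c)]) :=
      step_sel p v c hp (hrs (v, c) (List.mem_cons_self))
    have h2 : ∀ q ∈ p ++ [(v, c)], 1 ≤ q.2 := by
      intro q hq
      rcases List.mem_append.mp hq with h | h
      · exact hp q h
      · simp at h; subst h; exact hrs (v, c) (List.mem_cons_self)
    rw [List.foldl_cons, h1, ih (p ++ [(v, c)]) h2 (fun q hq => hrs q (List.mem_cons_of_mem _ hq))]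
    simp

theorem selS_nil : selS [] = (0, none, none) := by
  simp [selS, Mx_nil, Fx]

theorem loopB_runs : ∀ (rest : List Int) (x best : Int) (m1 m2 : Option Int) (cnt : Int),
    loopB best m1 m2 cnt x rest =
      List.foldl stepB (best, m1, m2)
        ((x, cnt + 1 + (countRun x rest).1) :: runList (countRun x rest).2) := by
  intro rest
  induction rest with
  | nil =>
    intro x best m1 m2 cnt
    simp only [loopB, countRun, runList_nil, List.foldl_cons, List.foldl_nil, stepB]
    norm_num
  | cons y ys ih =>
    intro x best m1 m2 cnt
    by_cases hyx : y = x
    · subst hyx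
      have hL : loopB best m1 m2 cnt y (y :: ys) = loopB best m1 m2 (cnt + 1) y ys := by
        simp [loopB]
      rw [hL, ih]
      have hc : countRun y (y :: ys) = ((countRun y ys).1 + 1, (countRun y ys).2) := by
        simp [countRun]
      rw [hc]
      have : cnt + 1 + ((countRun y ys).1 + 1) = cnt + 1 + 1 + (countRun y ys).1 := by ring
      rw [this]
    · have hc : countRun x (y :: ys) = (0, y :: ys) := by simp [countRun, hyx]
      rw [hc, runList_cons]
      have hrhs : List.foldl stepB (best, m1, m2)
          ((x, cnt + 1 + 0) :: (y, (countRun y ys).1 + 1) :: runList (countRun y ys).2)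
          = List.foldl stepB (stepB (best, m1, m2) (x, cnt + 1 + 0))
              ((y, (countRun y ys).1 + 1) :: runList (countRun y ys).2) := by
        simp
      rw [hrhs]
      have hstep : stepB (best, m1, m2) (x, cnt + 1 + 0)
          = if cnt + 1 > best then (cnt + 1, some x, none)
            else if cnt + 1 = best ∧ m2 = none then (best, m1, some x)
            else (best, m1, m2) := by
        simp [stepB]
      rw [hstep]
      have harith : ∀ (c' : Int), (0 : Int) + 1 + c' = c' + 1 := by intro c'; ring
      by_cases hgt : cnt + 1 > best
      · have hL : loopB best m1 m2 cnt x (y :: ys) = loopB (cnt + 1) (some x) none 0 y ys := by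
          simp [loopB, hyx, hgt]
        rw [hL, ih, harith]
        simp [hgt]
      · by_cases heq : cnt + 1 = best ∧ m2 = none
        · have hL : loopB best m1 m2 cnt x (y :: ys) = loopB best m1 (some x) 0 y ys := by
            simp [loopB, hyx, hgt, heq]
          rw [hL, ih, harith]
          simp [hgt, heq]
        · have hL : loopB best m1 m2 cnt x (y :: ys) = loopB best m1 m2 0 y ys := by
            simp only [loopB]
            rw [if_pos (by simp [hyx]), if_neg hgt, if_neg heq]
          rw [hL, ih, harith]
          simp [hgt, heq]

theorem portB_cons (a b : Int) (t : List Int) :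
    choi_bin_gap_alt (a :: b :: t) = pickB (runList (a :: b :: t)) := by
  have hrl : runList (a :: b :: t)
      = (a, (countRun a (b :: t)).1 + 1) :: runList (countRun a (b :: t)).2 :=
    runList_cons a (b :: t)
  have hpos : ∀ q ∈ runList (a :: b :: t), 1 ≤ q.2 := runList_pos _
  have hsel : loopB 0 none none 0 a (b :: t) = selS (runList (a :: b :: t)) := by
    rw [loopB_runs]
    have h1 : ((a : Int), (0 : Int) + 1 + (countRun a (b :: t)).1) :: runList (countRun a (b :: t)).2
        = runList (a :: b :: t) := by
      rw [hrl]
      have : (0 : Int) + 1 + (countRun a (b :: t)).1 = (countRun a (b :: t)).1 + 1 := by ring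
      rw [this]
    rw [h1]
    have := foldl_stepB_sel (runList (a :: b :: t)) [] (by simp) hpos
    rw [selS_nil] at this
    simpa using this
  have hne : runList (a :: b :: t) ≠ [] := by rw [hrl]; simp
  have hFne := Fx_ne_nil _ hne
  have halt : choi_bin_gap_alt (a :: b :: t)
      = (match (selS (runList (a :: b :: t))).2.2 with
         | none => (selS (runList (a :: b :: t))).2.1.getD 0
         | some v => v) := by
    simp only [choi_bin_gap_alt]
    rw [if_neg (by simp), hsel]
  rw [halt]
  show (match (Fx (runList (a :: b :: t)))[1]? with
        | none => (Fx (runList (a :: b :: t))).head?.getD 0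
        | some v => v) = pickB (runList (a :: b :: t))
  have hpick : pickB (runList (a :: b :: t))
      = if (Fx (runList (a :: b :: t))).length > 1
        then (PySem.List.pyGet? (Fx (runList (a :: b :: t))) 1).getD 0
        else (PySem.List.pyGet? (Fx (runList (a :: b :: t))) 0).getD 0 := rfl
  rw [hpick]
  rcases hF : Fx (runList (a :: b :: t)) with _ | ⟨w0, ws⟩
  · exact absurd hF hFne
  rcases ws with _ | ⟨w1, ws'⟩
  · simp [PySem.List.pyGet?, PySem.List.pyIdx?]
  · simp [PySem.List.pyGet?, PySem.List.pyIdx?]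

theorem answers_eq (size num : List Int) (m : Int) (F : List Int)
    (hmap : ((PySem.List.enumerate size).filter (fun q => q.2 = m)).map
        (fun q => (PySem.List.pyGet? num q.1).getD 0) = F)
    (hne : F ≠ []) :
    (if (((PySem.List.enumerate size).filter (fun q => q.2 = m)).map (fun q => q.1)).length > 1 then
      (PySem.List.pyGet? num ((PySem.List.pyGet? (((PySem.List.enumerate size).filter (fun q => q.2 = m)).map (fun q => q.1)) 1).getD 0)).getD 0
    else
      (PySem.List.pyGet? num ((PySem.List.pyGet? (((PySem.List.enumerate size).filter (fun q => q.2 = m)).map (fun q => q.1)) 0).getD 0)).getD 0)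
    = (if F.length > 1 then (PySem.List.pyGet? F 1).getD 0 else (PySem.List.pyGet? F 0).getD 0) := by
  cases hL : (PySem.List.enumerate size).filter (fun q => decide (q.2 = m)) with
  | nil => rw [hL] at hmap; simp at hmap; exact absurd hmap hne
  | cons q0 L' =>
    cases L' with
    | nil =>
      rw [hL] at hmap
      rw [← hmap]
      simp
    | cons q1 L'' =>
      rw [hL] at hmap
      rw [← hmap]
      simp

theorem caseEq (rs : List (Int × Int)) (hrs : rs ≠ []) :
    pickA (rs.map (fun p => p.1)) (rs.map (fun p => p.2)) = pickB rs := by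
  simp only [pickA, pickB]
  set m := (PySem.List.max? (rs.map (fun p => p.2)) (fun x => x)).getD 0 with hm
  have hmmem : m ∈ rs.map (fun p => p.2) := max?_getD_mem _ (by simpa using hrs)
  obtain ⟨p, hp, hpm⟩ := List.mem_map.mp hmmem
  have hFne : (rs.filter (fun p => p.2 = m)).map (fun p => p.1) ≠ [] := by
    have h1 : p ∈ rs.filter (fun p => p.2 = m) := List.mem_filter.mpr ⟨hp, by simp [hpm]⟩
    exact List.ne_nil_of_mem (List.mem_map_of_mem h1)
  refine answers_eq (rs.map (fun p => p.2)) (rs.map (fun p => p.1)) m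
      ((rs.filter (fun p => p.2 = m)).map (fun p => p.1)) ?_ hFne
  simpa using sel rs [] [] m

theorem caseDrop (rs : List (Int × Int)) (plast : Int × Int)
    (hlast : rs.getLast? = some plast) (h1 : plast.2 = 1)
    (hlen : 2 ≤ rs.length)
    (hpos : ∀ p ∈ rs, 1 ≤ p.2)
    (hnot : rs.length = 2 → ∀ p, rs.head? = some p → p.2 ≠ 1) :
    pickA (rs.map (fun p => p.1)) (rs.dropLast.map (fun p => p.2)) = pickB rs := by
  have hrs : rs ≠ [] := by intro h; subst h; simp at hlast
  have hplast : plast = rs.getLast hrs := by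
    rw [List.getLast?_eq_some_getLast hrs] at hlast; exact (Option.some.inj hlast).symm
  have hsplit : rs.dropLast ++ [plast] = rs := by
    rw [hplast]; exact List.dropLast_concat_getLast hrs
  have hdl_ne : rs.dropLast ≠ [] := by
    intro h
    have := congrArg List.length hsplit
    simp [h] at this
    omega
  have hsz_ne : rs.dropLast.map (fun p => p.2) ≠ [] := by
    intro h; exact hdl_ne (List.map_eq_nil_iff.mp h)
  set m' := (PySem.List.max? (rs.dropLast.map (fun p => p.2)) (fun x => x)).getD 0 with hm'
  have hm'mem : m' ∈ rs.dropLast.map (fun p => p.2) := max?_getD_mem _ hsz_ne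
  obtain ⟨pm, hpm_mem, hpm⟩ := List.mem_map.mp hm'mem
  have hm'pos : 1 ≤ m' := by
    rw [← hpm]; exact hpos pm (List.mem_of_mem_dropLast hpm_mem)
  have hbound_size : ∀ y ∈ rs.dropLast.map (fun p => p.2), y ≤ m' := max?_getD_bound _
  have hmapsnd : rs.map (fun p => p.2) = rs.dropLast.map (fun p => p.2) ++ [plast.2] := by
    conv_lhs => rw [← hsplit]
    simp
  have hmapfst : rs.map (fun p => p.1) = rs.dropLast.map (fun p => p.1) ++ [plast.1] := by
    conv_lhs => rw [← hsplit]
    simp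
  by_cases hm1 : m' = 1
  · -- every run has count 1; rs.length ≥ 3 (length 2 is excluded by hnot)
    have hall_dl : ∀ p ∈ rs.dropLast, p.2 = 1 := by
      intro p hp
      have hle := hbound_size p.2 (List.mem_map_of_mem hp)
      have hge := hpos p (List.mem_of_mem_dropLast hp)
      omega
    have hall : ∀ p ∈ rs, p.2 = 1 := by
      intro p hp
      rw [← hsplit] at hp
      rcases List.mem_append.mp hp with h | h
      · exact hall_dl p h
      · simp at h; subst h; exact h1
    have h3 : 3 ≤ rs.length := by
      rcases rs with _ | ⟨p0, rs1⟩
      · simp at hrs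
      · have hne2 : (p0 :: rs1).length ≠ 2 := by
          intro h2
          exact hnot h2 p0 rfl (hall p0 (List.mem_cons_self))
        simp at hlen hne2 ⊢
        omega
    have hmB : (PySem.List.max? (rs.map (fun p => p.2)) (fun x => x)).getD 0 = 1 := by
      apply max?_id_value
      · rw [hmapsnd]; exact List.mem_append_right _ (by simp [h1])
      · intro y hy
        obtain ⟨p, hp, hpy⟩ := List.mem_map.mp hy
        rw [← hpy, hall p hp]
    have hfilterB : rs.filter (fun p => p.2 = (PySem.List.max? (rs.map (fun p => p.2)) (fun x => x)).getD 0) = rs := by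
      rw [hmB]
      exact List.filter_eq_self.mpr (fun p hp => by simp [hall p hp])
    have hfilterA : rs.dropLast.filter (fun p => p.2 = m') = rs.dropLast := by
      rw [hm1]
      exact List.filter_eq_self.mpr (fun p hp => by simp [hall_dl p hp])
    have hmapA := sel rs.dropLast [] [plast.1] m'
    simp only [List.nil_append, List.length_nil, Nat.cast_zero, ← hmapfst] at hmapA
    have hA := answers_eq (rs.dropLast.map (fun p => p.2)) (rs.map (fun p => p.1)) m'
        ((rs.dropLast.filter (fun p => p.2 = m')).map Prod.fst) (by simpa using hmapA)
        (by rw [hfilterA]; intro h; exact hdl_ne (List.map_eq_nil_iff.mp h))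
    simp only [pickA, pickB]
    rw [hA, hfilterB, hfilterA]
    -- both sides pick the second run's value
    rcases rs with _ | ⟨p0, rs1⟩
    · simp at hrs
    rcases rs1 with _ | ⟨p1, rs2⟩
    · simp at h3
    rcases rs2 with _ | ⟨p2, rs3⟩
    · simp at h3
    simp [List.dropLast_cons₂]
    have hnn : (0:Int) ≤ (rs3.length : Int) + 1 := by positivity
    simp [PySem.List.pyGet?, PySem.List.pyIdx?, hnn]
  · -- the last run (count 1) is never a mode: both sides use the dropLast runs
    have hmB : (PySem.List.max? (rs.map (fun p => p.2)) (fun x => x)).getD 0 = m' := by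
      apply max?_id_value
      · rw [hmapsnd]; exact List.mem_append_left _ hm'mem
      · intro y hy
        rw [hmapsnd] at hy
        rcases List.mem_append.mp hy with h | h
        · exact hbound_size y h
        · simp at h; omega
    have hfilterB : rs.filter (fun p => p.2 = (PySem.List.max? (rs.map (fun p => p.2)) (fun x => x)).getD 0)
        = rs.dropLast.filter (fun p => p.2 = m') := by
      rw [hmB]
      conv_lhs => rw [← hsplit]
      rw [List.filter_append]
      have : [plast].filter (fun p => decide (p.2 = m')) = [] := by
        simp [h1]; omega
      rw [this, List.append_nil]
    have hFne : (rs.dropLast.filter (fun p => p.2 = m')).map Prod.fst ≠ [] := by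
      have h1' : pm ∈ rs.dropLast.filter (fun p => p.2 = m') :=
        List.mem_filter.mpr ⟨hpm_mem, by simp [hpm]⟩
      exact List.ne_nil_of_mem (List.mem_map_of_mem h1')
    have hmapA := sel rs.dropLast [] [plast.1] m'
    simp only [List.nil_append, List.length_nil, Nat.cast_zero, ← hmapfst] at hmapA
    have hA := answers_eq (rs.dropLast.map (fun p => p.2)) (rs.map (fun p => p.1)) m'
        ((rs.dropLast.filter (fun p => p.2 = m')).map Prod.fst) (by simpa using hmapA) hFne
    simp only [pickA, pickB]
    rw [hA, hfilterB]

theorem main_eq (A : List Int) (hne : A ≠ []) (hD : ¬ D_choi_bin_gap A) :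
    choi_bin_gap A = choi_bin_gap_alt A := by
  rcases A with _ | ⟨a, rest⟩
  · exact absurd rfl hne
  rcases rest with _ | ⟨b, t⟩
  · simp [choi_bin_gap, choi_bin_gap_alt]
  rw [portA_cons, portB_cons]
  have hloop := loopA_spec (b :: t) a [a] [] 1 (by simp)
  set c := (countRun a (b :: t)).1 with hc
  set r := (countRun a (b :: t)).2 with hr
  have hrsA : runList (a :: b :: t) = (a, c + 1) :: runList r := runList_cons a (b :: t)
  have hnum : (loopA a (b :: t) [a] [] 1).1 = (runList (a :: b :: t)).map (fun p => p.1) := by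
    rw [hloop, hrsA]; simp
  have hsize : (loopA a (b :: t) [a] [] 1).2 = pack (1 + c) (runList r) := by
    rw [hloop]; simp
  have hpos : ∀ p ∈ runList (a :: b :: t), 1 ≤ p.2 := runList_pos _
  rcases hRL : runList r with _ | ⟨q, RL'⟩
  · -- tail is one single run: size bucket is the full count list
    have hsz' : (loopA a (b :: t) [a] [] 1).2 = (runList (a :: b :: t)).map (fun p => p.2) := by
      rw [hsize, hRL, hrsA, hRL]
      simp [pack, add_comm]
    rw [hnum, hsz']
    exact caseEq _ (by rw [hrsA]; simp)
  · have hRLne : runList r ≠ [] := by rw [hRL]; simp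
    obtain ⟨plast, hplast⟩ : ∃ p, (runList (a :: b :: t)).getLast? = some p := by
      cases h : (runList (a :: b :: t)).getLast? with
      | none =>
        rw [List.getLast?_eq_none_iff] at h
        rw [hrsA] at h; simp at h
      | some p => exact ⟨p, rfl⟩
    have hlastRL : (runList r).getLast? = some plast := by
      rw [hrsA, hRL, List.getLast?_cons_cons] at hplast
      rwa [hRL]
    by_cases hone : plast.2 = 1
    · -- the last run has count 1: size bucket misses it
      have hsz' : (loopA a (b :: t) [a] [] 1).2
          = ((runList (a :: b :: t)).dropLast).map (fun p => p.2) := by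
        rw [hsize, pack_of_last_one (runList r) (1 + c) plast hlastRL hone, hrsA, hRL,
          List.dropLast_cons₂]
        simp [add_comm]
      rw [hnum, hsz']
      apply caseDrop _ plast hplast hone
      · rw [hrsA, hRL]; simp
      · exact hpos
      · -- a two-run list of singleton runs is exactly the D_ region, excluded by hD
        intro hlen2 p hp hp1
        exfalso; apply hD
        rw [hrsA, hRL] at hlen2 hp
        simp at hlen2 hp
        have hRL'nil : RL' = [] := hlen2
        have hc0 : c = 0 := by rw [← hp] at hp1; simp at hp1; omega
        have hba : ¬ b = a := by
          intro hab
          rw [hc] at hc0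
          subst hab
          have := countRun_nonneg b t
          simp [countRun] at hc0
          omega
        have hr_eq : r = b :: t := by rw [hr]; simp [countRun, hba]
        have hrl_bt := runList_cons b t
        rw [← hr_eq, hRL, hRL'nil] at hrl_bt
        have hq : q = (b, (countRun b t).1 + 1) := by
          have := hrl_bt.symm
          simp at this
          exact this.1.symm
        have hr2 : runList (countRun b t).2 = [] := by
          have := hrl_bt.symm
          simp at this
          exact this.2
        have hpq : plast = q := by
          rw [hrsA, hRL, hRL'nil] at hplast
          have : ((a, c + 1) :: [q]).getLast? = some q := by simp
          rw [this] at hplast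
          exact (Option.some.inj hplast).symm
        have hc2 : (countRun b t).1 = 0 := by
          rw [hpq, hq] at hone
          simp at hone
          omega
        have ht : t = [] :=
          countRun_zero_nil b t hc2 ((runList_eq_nil_iff _).mp hr2)
        subst ht
        constructor
        · simp
        · simp [PySem.List.pyGet?, PySem.List.pyIdx?]
          exact fun h => hba h.symm
    · -- the last run has count ≥ 2: size bucket is the full count list
      have hsz' : (loopA a (b :: t) [a] [] 1).2 = (runList (a :: b :: t)).map (fun p => p.2) := by
        rw [hsize, pack_of_last_ne_one (runList r) (1 + c)
          (fun p hp => by rw [hlastRL] at hp; exact (Option.some.inj hp) ▸ hone),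
          hrsA]
        simp [add_comm]
      rw [hnum, hsz']
      exact caseEq _ (by rw [hrsA]; simp)

-- ===== VERDICT (by name: the statement is the Claim_ definition above) =====
theorem choi_bin_gap_spec : Claim_unchanged_choi_bin_gap := by
  intro A _ hPre hD
  exact main_eq A hPre hD

theorem choi_bin_gap_changed : Claim_changed_choi_bin_gap := by
  unfold Claim_changed_choi_bin_gap; decide

theorem choi_bin_gap_tight : Claim_exact_choi_bin_gap := by
  intro A _ _ hD
  obtain ⟨hlen, hget⟩ := hD
  rcases A with _ | ⟨x, A1⟩
  · simp at hlen
  rcases A1 with _ | ⟨y, A2⟩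
  · simp at hlen
  have hA2 : A2 = [] := by simp at hlen; exact hlen
  subst hA2
  have hxy : ¬ x = y := by
    intro h; subst h; exact hget rfl
  have hyx : ¬ y = x := fun h => hxy h.symm
  simp [choi_bin_gap, choi_bin_gap_alt, loopA, loopB, countRun, hxy, hyx,
    PySem.List.enumerate_cons, PySem.List.max?, PySem.List.pyGet?, PySem.List.pyIdx?]
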